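-- pv_equiv track=rewrite | github.com/raseen2305/broskies_1 | backend/app/services/evaluation_engine.py | _detect_modern_practices
-- ===== SOURCE A (Python) =====
-- from typing import Dict, List, Any, Optional, Tuple
--
-- def _detect_modern_practices(contents: List[Dict[str, Any]]) -> Dict[str, bool]:
--     """Detect modern development practices"""
--
--     practices = {
--         "version_control": False,
--         "dependency_management": False,
--         "testing": False,
--         "ci_cd": False,
--         "containerization": False,
--         "linting": False,
--         "type_checking": False
--     }
--
--     all_content = " ".join([file_info.get("content", "") for file_info in contents])
--     all_filenames = " ".join([file_info.get("name", "") for file_info in contents])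
--
--     # Check for various practices
--     if ".git" in all_filenames or "git" in all_content.lower():
--         practices["version_control"] = True
--
--     if any(dep_file in all_filenames for dep_file in ["package.json", "requirements.txt", "pom.xml", "Cargo.toml"]):
--         practices["dependency_management"] = True
--
--     if any(test_indicator in all_filenames.lower() for test_indicator in ["test", "spec", "__test__"]):
--         practices["testing"] = True
--
--     if any(ci_file in all_filenames for ci_file in [".github/workflows", ".gitlab-ci.yml", "Jenkinsfile"]):
--         practices["ci_cd"] = True
--
--     if "Dockerfile" in all_filenames or "docker-compose" in all_filenames:
--         practices["containerization"] = True
--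
--     if any(lint_file in all_filenames for lint_file in [".eslintrc", ".pylintrc", "tslint.json"]):
--         practices["linting"] = True
--
--     if "typescript" in all_content.lower() or ".ts" in all_filenames:
--         practices["type_checking"] = True
--
--     return practices
-- ===== SOURCE B (Python) =====
-- def _detect_modern_practices(contents):
--     """Detect modern development practices (single pass over files, no joined strings)."""
--     vc = dep = test = ci = cont = lint = ty = False
--     for file_info in contents:
--         name = file_info.get("name", "")
--         name_lower = name.lower()
--         content_lower = file_info.get("content", "").lower()
--         vc = vc or ".git" in name or "git" in content_lower
--         dep = dep or any(d in name for d in ["package.json", "requirements.txt", "pom.xml", "Cargo.toml"])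
--         test = test or any(t in name_lower for t in ["test", "spec", "__test__"])
--         ci = ci or any(c in name for c in [".github/workflows", ".gitlab-ci.yml", "Jenkinsfile"])
--         cont = cont or "Dockerfile" in name or "docker-compose" in name
--         lint = lint or any(l in name for l in [".eslintrc", ".pylintrc", "tslint.json"])
--         ty = ty or "typescript" in content_lower or ".ts" in name
--     return {
--         "version_control": vc,
--         "dependency_management": dep,
--         "testing": test,
--         "ci_cd": ci,
--         "containerization": cont,
--         "linting": lint,
--         "type_checking": ty,
--     }
-- ===== Notes on version B (the rewrite author's own statement) =====
-- stated objective: alternative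
-- what changed: B drops A's two big space-joined strings (rebuilt and rescanned for every check) and instead makes a single pass over the files, ORing each per-file keyword indicator into seven accumulated flags; correctness rests on the proved fact that a space-free keyword occurs in the space-join iff it occurs in some individual file string.
import Mathlib
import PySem

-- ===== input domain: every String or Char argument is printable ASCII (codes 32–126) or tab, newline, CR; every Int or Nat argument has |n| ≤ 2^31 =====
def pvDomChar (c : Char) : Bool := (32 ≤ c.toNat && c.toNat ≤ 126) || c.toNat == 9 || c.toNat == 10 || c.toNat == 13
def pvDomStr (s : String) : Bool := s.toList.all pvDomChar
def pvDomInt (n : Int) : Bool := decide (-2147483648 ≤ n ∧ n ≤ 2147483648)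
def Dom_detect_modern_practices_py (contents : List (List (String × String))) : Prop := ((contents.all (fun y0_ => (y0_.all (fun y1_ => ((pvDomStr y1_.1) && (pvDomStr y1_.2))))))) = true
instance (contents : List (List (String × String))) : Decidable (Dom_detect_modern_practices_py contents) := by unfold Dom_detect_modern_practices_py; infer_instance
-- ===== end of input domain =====

-- B replaces A's "join all contents/names into two big strings, then scan them repeatedly"
-- by a single pass over the files that ORs each per-file indicator into seven flags (objective: alternative decomposition).

-- ===== PORT A =====
def detect_modern_practices_py (contents : List (List (String × String))) : List (String × Bool) :=
  let practices : PySem.Dict String Bool := PySem.Dict.ofList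
    [("version_control", false), ("dependency_management", false), ("testing", false),
     ("ci_cd", false), ("containerization", false), ("linting", false), ("type_checking", false)]
  let all_content := PySem.Str.join " " (contents.map (fun file_info => (PySem.Dict.mk file_info).getD "content" ""))
  let all_filenames := PySem.Str.join " " (contents.map (fun file_info => (PySem.Dict.mk file_info).getD "name" ""))
  let practices := if PySem.Str.isIn ".git" all_filenames || PySem.Str.isIn "git" (PySem.Str.lower all_content) then practices.insert "version_control" true else practices
  let practices := if ["package.json", "requirements.txt", "pom.xml", "Cargo.toml"].any (fun dep_file => PySem.Str.isIn dep_file all_filenames) then practices.insert "dependency_management" true else practices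
  let practices := if ["test", "spec", "__test__"].any (fun test_indicator => PySem.Str.isIn test_indicator (PySem.Str.lower all_filenames)) then practices.insert "testing" true else practices
  let practices := if [".github/workflows", ".gitlab-ci.yml", "Jenkinsfile"].any (fun ci_file => PySem.Str.isIn ci_file all_filenames) then practices.insert "ci_cd" true else practices
  let practices := if PySem.Str.isIn "Dockerfile" all_filenames || PySem.Str.isIn "docker-compose" all_filenames then practices.insert "containerization" true else practices
  let practices := if [".eslintrc", ".pylintrc", "tslint.json"].any (fun lint_file => PySem.Str.isIn lint_file all_filenames) then practices.insert "linting" true else practices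
  let practices := if PySem.Str.isIn "typescript" (PySem.Str.lower all_content) || PySem.Str.isIn ".ts" all_filenames then practices.insert "type_checking" true else practices
  practices.items

-- ===== PORT B =====
def detect_modern_practices_py_alt (contents : List (List (String × String))) : List (String × Bool) :=
  let f := contents.foldl
    (fun (s : Bool × Bool × Bool × Bool × Bool × Bool × Bool) file_info =>
      let name := (PySem.Dict.mk file_info).getD "name" ""
      let name_lower := PySem.Str.lower name
      let content_lower := PySem.Str.lower ((PySem.Dict.mk file_info).getD "content" "")
      (s.1 || PySem.Str.isIn ".git" name || PySem.Str.isIn "git" content_lower,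
       s.2.1 || ["package.json", "requirements.txt", "pom.xml", "Cargo.toml"].any (fun d => PySem.Str.isIn d name),
       s.2.2.1 || ["test", "spec", "__test__"].any (fun t => PySem.Str.isIn t name_lower),
       s.2.2.2.1 || [".github/workflows", ".gitlab-ci.yml", "Jenkinsfile"].any (fun c => PySem.Str.isIn c name),
       s.2.2.2.2.1 || PySem.Str.isIn "Dockerfile" name || PySem.Str.isIn "docker-compose" name,
       s.2.2.2.2.2.1 || [".eslintrc", ".pylintrc", "tslint.json"].any (fun l => PySem.Str.isIn l name),
       s.2.2.2.2.2.2 || PySem.Str.isIn "typescript" content_lower || PySem.Str.isIn ".ts" name))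
    (false, false, false, false, false, false, false)
  [("version_control", f.1), ("dependency_management", f.2.1), ("testing", f.2.2.1),
   ("ci_cd", f.2.2.2.1), ("containerization", f.2.2.2.2.1), ("linting", f.2.2.2.2.2.1),
   ("type_checking", f.2.2.2.2.2.2)]

-- ===== PRECONDITION & SPEC =====
def Spec_detect_modern_practices_py (contents : List (List (String × String))) (out : List (String × Bool)) : Prop := out = detect_modern_practices_py_alt contents
instance (contents : List (List (String × String))) (out : List (String × Bool)) : Decidable (Spec_detect_modern_practices_py contents out) := by unfold Spec_detect_modern_practices_py; infer_instance

-- ===== CLAIM (what is proved, stated in full; the proofs are below) =====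
def Claim_equal_detect_modern_practices_py : Prop := ∀ (contents : List (List (String × String))), Dom_detect_modern_practices_py contents → Spec_detect_modern_practices_py contents (detect_modern_practices_py contents)

-- ===== LEMMAS AND PROOFS =====

-- a nonempty, space-free pattern occurs in a ++ ' ' :: b iff it occurs in a or in b
theorem pvIsIn_append_cons (sub a b : List Char) (hne : sub ≠ []) (hsp : ' ' ∉ sub) :
    PySem.Chars.isIn sub (a ++ ' ' :: b) = (PySem.Chars.isIn sub a || PySem.Chars.isIn sub b) := by
  rw [Bool.eq_iff_iff, Bool.or_eq_true]
  rw [← PySem.Chars.exists_prefix_drop_iff_isIn, ← PySem.Chars.exists_prefix_drop_iff_isIn,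
    ← PySem.Chars.exists_prefix_drop_iff_isIn]
  constructor
  · rintro ⟨j, hj⟩
    by_cases hja : j ≤ a.length
    · rw [List.drop_append, Nat.sub_eq_zero_of_le hja, List.drop_zero] at hj
      by_cases hlen : sub.length ≤ (a.drop j).length
      · left; exact ⟨j, List.prefix_of_prefix_length_le hj (List.prefix_append _ _) hlen⟩
      · exfalso
        obtain ⟨t, ht⟩ := hj
        have hidx : (a.drop j).length < sub.length := Nat.lt_of_not_le hlen
        have h1 : (a.drop j ++ ' ' :: b)[(a.drop j).length]? = some ' ' := by
          rw [List.getElem?_append_right (le_refl _)]; simp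
        have h2 : (sub ++ t)[(a.drop j).length]? = sub[(a.drop j).length]? := by
          rw [List.getElem?_append, if_pos hidx]
        rw [ht, h1] at h2
        exact hsp (List.mem_of_getElem? h2.symm)
    · right
      refine ⟨j - a.length - 1, ?_⟩
      rw [List.drop_append, List.drop_eq_nil_of_le (by omega), List.nil_append] at hj
      have : j - a.length = (j - a.length - 1) + 1 := by omega
      rwa [this, List.drop_succ_cons] at hj
  · rintro (⟨j, hj⟩ | ⟨j, hj⟩)
    · by_cases hja : j ≤ a.length
      · refine ⟨j, ?_⟩
        rw [List.drop_append, Nat.sub_eq_zero_of_le hja, List.drop_zero]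
        exact hj.trans (List.prefix_append _ _)
      · exfalso
        rw [List.drop_eq_nil_of_le (by omega)] at hj
        exact hne (List.prefix_nil.mp hj)
    · refine ⟨a.length + 1 + j, ?_⟩
      rw [List.drop_append, List.drop_eq_nil_of_le (by omega), List.nil_append]
      have : a.length + 1 + j - a.length = j + 1 := by omega
      rwa [this, List.drop_succ_cons]

-- occurrence in the space-join = occurrence in one of the parts
theorem pvIsIn_join (sub : List Char) (hne : sub ≠ []) (hsp : ' ' ∉ sub) :
    ∀ parts : List (List Char),
      PySem.Chars.isIn sub (PySem.Chars.join [' '] parts) = parts.any (fun p => PySem.Chars.isIn sub p)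
  | [] => by
    rw [PySem.Chars.join_nil, List.any_nil]
    rw [PySem.Chars.isIn_eq_false_iff]
    intro h
    exact hne (List.infix_nil.mp h)
  | [p] => by rw [PySem.Chars.join_singleton, List.any_cons, List.any_nil, Bool.or_false]
  | p :: q :: rest => by
    rw [PySem.Chars.join_cons_cons, List.append_assoc, List.singleton_append,
      pvIsIn_append_cons sub p _ hne hsp, pvIsIn_join sub hne hsp (q :: rest)]
    simp [List.any_cons]

theorem pvLower_join (parts : List (List Char)) :
    PySem.Chars.lower (PySem.Chars.join [' '] parts) = PySem.Chars.join [' '] (parts.map PySem.Chars.lower) := by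
  match parts with
  | [] => rw [PySem.Chars.join_nil, List.map_nil, PySem.Chars.join_nil]; rfl
  | [p] => rw [PySem.Chars.join_singleton, List.map_cons, List.map_nil, PySem.Chars.join_singleton]
  | p :: q :: rest =>
    rw [PySem.Chars.join_cons_cons, List.map_cons, List.map_cons, PySem.Chars.join_cons_cons,
      ← List.map_cons, PySem.Chars.lower, List.map_append, List.map_append, ← PySem.Chars.lower,
      ← PySem.Chars.lower, ← PySem.Chars.lower, pvLower_join (q :: rest)]
    rfl

-- the String level join/scan lemmas
theorem pvStr_isIn_join (sub : String) (parts : List String)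
    (hne : sub.toList ≠ []) (hsp : ' ' ∉ sub.toList) :
    PySem.Str.isIn sub (PySem.Str.join " " parts) = parts.any (fun p => PySem.Str.isIn sub p) := by
  rw [PySem.Str.isIn_eq, PySem.Str.toList_join]
  have : (" " : String).toList = [' '] := rfl
  rw [this, pvIsIn_join sub.toList hne hsp, List.any_map]
  simp only [Function.comp_def, PySem.Str.isIn_eq]

theorem pvStr_isIn_lower_join (sub : String) (parts : List String)
    (hne : sub.toList ≠ []) (hsp : ' ' ∉ sub.toList) :
    PySem.Str.isIn sub (PySem.Str.lower (PySem.Str.join " " parts))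
      = parts.any (fun p => PySem.Str.isIn sub (PySem.Str.lower p)) := by
  rw [PySem.Str.isIn_eq, PySem.Str.toList_lower, PySem.Str.toList_join]
  have : (" " : String).toList = [' '] := rfl
  rw [this, pvLower_join, List.map_map, pvIsIn_join sub.toList hne hsp, List.any_map]
  simp only [Function.comp_def, PySem.Str.isIn_eq, PySem.Str.toList_lower]

-- the dict bookkeeping of port A, for arbitrary condition values
theorem pvBuild (b1 b2 b3 b4 b5 b6 b7 : Bool) :
    (let practices : PySem.Dict String Bool := PySem.Dict.ofList
      [("version_control", false), ("dependency_management", false), ("testing", false),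
       ("ci_cd", false), ("containerization", false), ("linting", false), ("type_checking", false)]
     let practices := if b1 then practices.insert "version_control" true else practices
     let practices := if b2 then practices.insert "dependency_management" true else practices
     let practices := if b3 then practices.insert "testing" true else practices
     let practices := if b4 then practices.insert "ci_cd" true else practices
     let practices := if b5 then practices.insert "containerization" true else practices
     let practices := if b6 then practices.insert "linting" true else practices
     let practices := if b7 then practices.insert "type_checking" true else practices
     practices.items)
    = [("version_control", b1), ("dependency_management", b2), ("testing", b3),
       ("ci_cd", b4), ("containerization", b5), ("linting", b6), ("type_checking", b7)] := by
  cases b1 <;> cases b2 <;> cases b3 <;> cases b4 <;> cases b5 <;> cases b6 <;> cases b7 <;> rfl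

-- B's fold accumulates exactly `initial flag || any over the files`
theorem pvFold (l : List (List (String × String))) (s : Bool × Bool × Bool × Bool × Bool × Bool × Bool) :
    l.foldl
      (fun (s : Bool × Bool × Bool × Bool × Bool × Bool × Bool) file_info =>
        let name := (PySem.Dict.mk file_info).getD "name" ""
        let name_lower := PySem.Str.lower name
        let content_lower := PySem.Str.lower ((PySem.Dict.mk file_info).getD "content" "")
        (s.1 || PySem.Str.isIn ".git" name || PySem.Str.isIn "git" content_lower,
         s.2.1 || ["package.json", "requirements.txt", "pom.xml", "Cargo.toml"].any (fun d => PySem.Str.isIn d name),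
         s.2.2.1 || ["test", "spec", "__test__"].any (fun t => PySem.Str.isIn t name_lower),
         s.2.2.2.1 || [".github/workflows", ".gitlab-ci.yml", "Jenkinsfile"].any (fun c => PySem.Str.isIn c name),
         s.2.2.2.2.1 || PySem.Str.isIn "Dockerfile" name || PySem.Str.isIn "docker-compose" name,
         s.2.2.2.2.2.1 || [".eslintrc", ".pylintrc", "tslint.json"].any (fun l => PySem.Str.isIn l name),
         s.2.2.2.2.2.2 || PySem.Str.isIn "typescript" content_lower || PySem.Str.isIn ".ts" name)) s
    = (s.1 || l.any (fun fi => PySem.Str.isIn ".git" ((PySem.Dict.mk fi).getD "name" "") || PySem.Str.isIn "git" (PySem.Str.lower ((PySem.Dict.mk fi).getD "content" ""))),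
       s.2.1 || l.any (fun fi => ["package.json", "requirements.txt", "pom.xml", "Cargo.toml"].any (fun d => PySem.Str.isIn d ((PySem.Dict.mk fi).getD "name" ""))),
       s.2.2.1 || l.any (fun fi => ["test", "spec", "__test__"].any (fun t => PySem.Str.isIn t (PySem.Str.lower ((PySem.Dict.mk fi).getD "name" "")))),
       s.2.2.2.1 || l.any (fun fi => [".github/workflows", ".gitlab-ci.yml", "Jenkinsfile"].any (fun c => PySem.Str.isIn c ((PySem.Dict.mk fi).getD "name" ""))),
       s.2.2.2.2.1 || l.any (fun fi => PySem.Str.isIn "Dockerfile" ((PySem.Dict.mk fi).getD "name" "") || PySem.Str.isIn "docker-compose" ((PySem.Dict.mk fi).getD "name" "")),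
       s.2.2.2.2.2.1 || l.any (fun fi => [".eslintrc", ".pylintrc", "tslint.json"].any (fun lf => PySem.Str.isIn lf ((PySem.Dict.mk fi).getD "name" ""))),
       s.2.2.2.2.2.2 || l.any (fun fi => PySem.Str.isIn "typescript" (PySem.Str.lower ((PySem.Dict.mk fi).getD "content" "")) || PySem.Str.isIn ".ts" ((PySem.Dict.mk fi).getD "name" ""))) := by
  induction l generalizing s with
  | nil => simp
  | cons fi t ih =>
    rw [List.foldl_cons, ih]
    simp only [List.any_cons]
    refine Prod.ext ?_ (Prod.ext ?_ (Prod.ext ?_ (Prod.ext ?_ (Prod.ext ?_ (Prod.ext ?_ ?_))))) <;>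
      simp [Bool.or_assoc]

-- ===== VERDICT (by name: the statement is the Claim_ definition above) =====
-- membership in a joined string, Prop form
theorem pvMemJoin (sub : String) (contents : List (List (String × String)))
    (f : List (String × String) → String) (h1 : sub.toList ≠ []) (h2 : ' ' ∉ sub.toList) :
    PySem.Str.isIn sub (PySem.Str.join " " (contents.map f)) = true
      ↔ ∃ fi ∈ contents, PySem.Str.isIn sub (f fi) = true := by
  rw [pvStr_isIn_join sub _ h1 h2]
  simp [List.any_eq_true]

theorem pvMemJoinLower (sub : String) (contents : List (List (String × String)))
    (f : List (String × String) → String) (h1 : sub.toList ≠ []) (h2 : ' ' ∉ sub.toList) :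
    PySem.Str.isIn sub (PySem.Str.lower (PySem.Str.join " " (contents.map f))) = true
      ↔ ∃ fi ∈ contents, PySem.Str.isIn sub (PySem.Str.lower (f fi)) = true := by
  rw [pvStr_isIn_lower_join sub _ h1 h2]
  simp [List.any_eq_true]

-- the seven flags: A's scan of the joined strings = B's per-file scan
theorem pvFlag1 (contents : List (List (String × String))) :
    (PySem.Str.isIn ".git" (PySem.Str.join " " (contents.map (fun file_info => (PySem.Dict.mk file_info).getD "name" "")))
      || PySem.Str.isIn "git" (PySem.Str.lower (PySem.Str.join " " (contents.map (fun file_info => (PySem.Dict.mk file_info).getD "content" "")))))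
    = contents.any (fun fi => PySem.Str.isIn ".git" ((PySem.Dict.mk fi).getD "name" "")
        || PySem.Str.isIn "git" (PySem.Str.lower ((PySem.Dict.mk fi).getD "content" ""))) := by
  rw [Bool.eq_iff_iff, Bool.or_eq_true,
    pvMemJoin ".git" contents _ (by decide) (by decide),
    pvMemJoinLower "git" contents _ (by decide) (by decide)]
  simp [List.any_eq_true, and_or_left, exists_or]

theorem pvFlag2 (contents : List (List (String × String))) :
    (["package.json", "requirements.txt", "pom.xml", "Cargo.toml"].any
      (fun dep_file => PySem.Str.isIn dep_file (PySem.Str.join " " (contents.map (fun file_info => (PySem.Dict.mk file_info).getD "name" "")))))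
    = contents.any (fun fi => ["package.json", "requirements.txt", "pom.xml", "Cargo.toml"].any
        (fun d => PySem.Str.isIn d ((PySem.Dict.mk fi).getD "name" ""))) := by
  rw [Bool.eq_iff_iff]
  simp only [List.any_cons, List.any_nil, Bool.or_false, Bool.or_eq_true]
  rw [pvMemJoin "package.json" contents _ (by decide) (by decide),
    pvMemJoin "requirements.txt" contents _ (by decide) (by decide),
    pvMemJoin "pom.xml" contents _ (by decide) (by decide),
    pvMemJoin "Cargo.toml" contents _ (by decide) (by decide)]
  simp [List.any_eq_true, and_or_left, exists_or]

theorem pvFlag3 (contents : List (List (String × String))) :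
    (["test", "spec", "__test__"].any
      (fun test_indicator => PySem.Str.isIn test_indicator (PySem.Str.lower (PySem.Str.join " " (contents.map (fun file_info => (PySem.Dict.mk file_info).getD "name" ""))))))
    = contents.any (fun fi => ["test", "spec", "__test__"].any
        (fun t => PySem.Str.isIn t (PySem.Str.lower ((PySem.Dict.mk fi).getD "name" "")))) := by
  rw [Bool.eq_iff_iff]
  simp only [List.any_cons, List.any_nil, Bool.or_false, Bool.or_eq_true]
  rw [pvMemJoinLower "test" contents _ (by decide) (by decide),
    pvMemJoinLower "spec" contents _ (by decide) (by decide),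
    pvMemJoinLower "__test__" contents _ (by decide) (by decide)]
  simp [List.any_eq_true, and_or_left, exists_or]

theorem pvFlag4 (contents : List (List (String × String))) :
    ([".github/workflows", ".gitlab-ci.yml", "Jenkinsfile"].any
      (fun ci_file => PySem.Str.isIn ci_file (PySem.Str.join " " (contents.map (fun file_info => (PySem.Dict.mk file_info).getD "name" "")))))
    = contents.any (fun fi => [".github/workflows", ".gitlab-ci.yml", "Jenkinsfile"].any
        (fun c => PySem.Str.isIn c ((PySem.Dict.mk fi).getD "name" ""))) := by
  rw [Bool.eq_iff_iff]
  simp only [List.any_cons, List.any_nil, Bool.or_false, Bool.or_eq_true]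
  rw [pvMemJoin ".github/workflows" contents _ (by decide) (by decide),
    pvMemJoin ".gitlab-ci.yml" contents _ (by decide) (by decide),
    pvMemJoin "Jenkinsfile" contents _ (by decide) (by decide)]
  simp [List.any_eq_true, and_or_left, exists_or]

theorem pvFlag5 (contents : List (List (String × String))) :
    (PySem.Str.isIn "Dockerfile" (PySem.Str.join " " (contents.map (fun file_info => (PySem.Dict.mk file_info).getD "name" "")))
      || PySem.Str.isIn "docker-compose" (PySem.Str.join " " (contents.map (fun file_info => (PySem.Dict.mk file_info).getD "name" ""))))
    = contents.any (fun fi => PySem.Str.isIn "Dockerfile" ((PySem.Dict.mk fi).getD "name" "")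
        || PySem.Str.isIn "docker-compose" ((PySem.Dict.mk fi).getD "name" "")) := by
  rw [Bool.eq_iff_iff, Bool.or_eq_true,
    pvMemJoin "Dockerfile" contents _ (by decide) (by decide),
    pvMemJoin "docker-compose" contents _ (by decide) (by decide)]
  simp [List.any_eq_true, and_or_left, exists_or]

theorem pvFlag6 (contents : List (List (String × String))) :
    ([".eslintrc", ".pylintrc", "tslint.json"].any
      (fun lint_file => PySem.Str.isIn lint_file (PySem.Str.join " " (contents.map (fun file_info => (PySem.Dict.mk file_info).getD "name" "")))))
    = contents.any (fun fi => [".eslintrc", ".pylintrc", "tslint.json"].any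
        (fun l => PySem.Str.isIn l ((PySem.Dict.mk fi).getD "name" ""))) := by
  rw [Bool.eq_iff_iff]
  simp only [List.any_cons, List.any_nil, Bool.or_false, Bool.or_eq_true]
  rw [pvMemJoin ".eslintrc" contents _ (by decide) (by decide),
    pvMemJoin ".pylintrc" contents _ (by decide) (by decide),
    pvMemJoin "tslint.json" contents _ (by decide) (by decide)]
  simp [List.any_eq_true, and_or_left, exists_or]

theorem pvFlag7 (contents : List (List (String × String))) :
    (PySem.Str.isIn "typescript" (PySem.Str.lower (PySem.Str.join " " (contents.map (fun file_info => (PySem.Dict.mk file_info).getD "content" ""))))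
      || PySem.Str.isIn ".ts" (PySem.Str.join " " (contents.map (fun file_info => (PySem.Dict.mk file_info).getD "name" ""))))
    = contents.any (fun fi => PySem.Str.isIn "typescript" (PySem.Str.lower ((PySem.Dict.mk fi).getD "content" ""))
        || PySem.Str.isIn ".ts" ((PySem.Dict.mk fi).getD "name" "")) := by
  rw [Bool.eq_iff_iff, Bool.or_eq_true,
    pvMemJoinLower "typescript" contents _ (by decide) (by decide),
    pvMemJoin ".ts" contents _ (by decide) (by decide)]
  simp [List.any_eq_true, and_or_left, exists_or]

-- B's port evaluated to its seven per-file scans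
theorem pvB_eq (contents : List (List (String × String))) :
    detect_modern_practices_py_alt contents
    = [("version_control", contents.any (fun fi => PySem.Str.isIn ".git" ((PySem.Dict.mk fi).getD "name" "") || PySem.Str.isIn "git" (PySem.Str.lower ((PySem.Dict.mk fi).getD "content" "")))),
       ("dependency_management", contents.any (fun fi => ["package.json", "requirements.txt", "pom.xml", "Cargo.toml"].any (fun d => PySem.Str.isIn d ((PySem.Dict.mk fi).getD "name" "")))),
       ("testing", contents.any (fun fi => ["test", "spec", "__test__"].any (fun t => PySem.Str.isIn t (PySem.Str.lower ((PySem.Dict.mk fi).getD "name" ""))))),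
       ("ci_cd", contents.any (fun fi => [".github/workflows", ".gitlab-ci.yml", "Jenkinsfile"].any (fun c => PySem.Str.isIn c ((PySem.Dict.mk fi).getD "name" "")))),
       ("containerization", contents.any (fun fi => PySem.Str.isIn "Dockerfile" ((PySem.Dict.mk fi).getD "name" "") || PySem.Str.isIn "docker-compose" ((PySem.Dict.mk fi).getD "name" ""))),
       ("linting", contents.any (fun fi => [".eslintrc", ".pylintrc", "tslint.json"].any (fun l => PySem.Str.isIn l ((PySem.Dict.mk fi).getD "name" "")))),
       ("type_checking", contents.any (fun fi => PySem.Str.isIn "typescript" (PySem.Str.lower ((PySem.Dict.mk fi).getD "content" "")) || PySem.Str.isIn ".ts" ((PySem.Dict.mk fi).getD "name" "")))] := by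
  simp only [detect_modern_practices_py_alt]
  rw [pvFold]
  simp only [Bool.false_or]

-- ===== VERDICT (by name: the statement is the Claim_ definition above) =====
theorem detect_modern_practices_py_spec : Claim_equal_detect_modern_practices_py := by
  intro contents _
  unfold Spec_detect_modern_practices_py
  rw [pvB_eq contents]
  simp only [detect_modern_practices_py]
  simp only [pvFlag1 contents, pvFlag2 contents, pvFlag3 contents, pvFlag4 contents,
    pvFlag5 contents, pvFlag6 contents, pvFlag7 contents]
  exact pvBuild _ _ _ _ _ _ _
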